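-- pv_equiv track=rewrite | github.com/definitelynotbercik/listy-programowanie | lista2/l2zad4.py | get_split_list
-- ===== SOURCE A (Python) =====
-- def get_split_list(num_of_pages, pages_per_file):
--     """
--     Return a list of page range for each split PDF file
--
--     ...
--
--     Input
--     ----------
--     num_of_pages (int): A number of pages in the initial PDF file
--     pages_per_file (int): A number of pages of each splitted PDF file
--
--     Output
--     ----------
--     split_list (list): A list of page range for each split PDF file
--     """
--
--     split_list = []
--     modifier = 0
--     for i in range(num_of_pages//pages_per_file):
--         split_list.append([modifier,pages_per_file + modifier])
--         modifier += pages_per_file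
--     split_list.append([modifier,num_of_pages])
--     return split_list
-- ===== SOURCE B (Python) =====
-- def get_split_list(num_of_pages, pages_per_file):
--     # Boundary-list formulation: compute all cut points, then pair consecutive ones.
--     full_chunks = max(num_of_pages // pages_per_file, 0)
--     bounds = [i * pages_per_file for i in range(full_chunks + 1)] + [num_of_pages]
--     return [[a, b] for a, b in zip(bounds, bounds[1:])]
-- ===== Notes on version B (the rewrite author's own statement) =====
-- stated objective: alternative
-- what changed: Replaces A's accumulator loop (tracking a running 'modifier' and appending ranges) by computing the list of cut-point boundaries once and pairing consecutive boundaries with zip.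
import Mathlib
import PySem

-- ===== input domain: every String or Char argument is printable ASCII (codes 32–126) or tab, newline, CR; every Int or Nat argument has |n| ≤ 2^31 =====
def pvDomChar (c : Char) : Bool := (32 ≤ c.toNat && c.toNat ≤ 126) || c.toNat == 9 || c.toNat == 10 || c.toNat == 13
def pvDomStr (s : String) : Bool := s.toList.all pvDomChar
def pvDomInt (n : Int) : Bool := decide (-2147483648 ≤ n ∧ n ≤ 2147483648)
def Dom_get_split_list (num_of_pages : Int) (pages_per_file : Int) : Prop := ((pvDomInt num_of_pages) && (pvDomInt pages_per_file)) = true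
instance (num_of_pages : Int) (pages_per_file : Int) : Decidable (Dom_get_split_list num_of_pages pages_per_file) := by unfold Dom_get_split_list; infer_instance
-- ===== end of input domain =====

-- B replaces A's accumulator-append loop by a boundary list paired consecutively (zip); same cost, different decomposition.

-- ===== PORT A =====
-- accumulator loop: state (split_list, modifier); appends [modifier, p + modifier] each step
def get_split_list (num_of_pages : Int) (pages_per_file : Int) : List (List Int) :=
  let st := (PySem.List.pyRange 0 (PySem.Int.floordiv num_of_pages pages_per_file) 1).foldl
    (fun (s : List (List Int) × Int) (_ : Int) =>
      (s.1 ++ [[s.2, pages_per_file + s.2]], s.2 + pages_per_file)) ([], 0)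
  st.1 ++ [[st.2, num_of_pages]]

-- ===== PORT B =====
def get_split_list_alt (num_of_pages : Int) (pages_per_file : Int) : List (List Int) :=
  let full_chunks := max (PySem.Int.floordiv num_of_pages pages_per_file) 0
  let bounds := (PySem.List.pyRange 0 (full_chunks + 1) 1).map (fun i => i * pages_per_file) ++ [num_of_pages]
  (bounds.zip (PySem.List.slice bounds (some 1) none)).map (fun ab => [ab.1, ab.2])

-- ===== PRECONDITION & SPEC =====
-- pages_per_file = 0 makes Python's '//' raise ZeroDivisionError, so it is excluded.
def Pre_get_split_list (num_of_pages : Int) (pages_per_file : Int) : Prop := pages_per_file ≠ 0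
instance (num_of_pages : Int) (pages_per_file : Int) : Decidable (Pre_get_split_list num_of_pages pages_per_file) := by unfold Pre_get_split_list; infer_instance
def pvWitness_get_split_list : Int × Int := (10, 3)

def Spec_get_split_list (num_of_pages : Int) (pages_per_file : Int) (out : List (List Int)) : Prop := out = get_split_list_alt num_of_pages pages_per_file
instance (num_of_pages : Int) (pages_per_file : Int) (out : List (List Int)) : Decidable (Spec_get_split_list num_of_pages pages_per_file out) := by unfold Spec_get_split_list; infer_instance

-- ===== CLAIM (what is proved, stated in full; the proofs are below) =====
def Claim_equal_get_split_list : Prop := ∀ (num_of_pages : Int) (pages_per_file : Int), Dom_get_split_list num_of_pages pages_per_file → Pre_get_split_list num_of_pages pages_per_file → Spec_get_split_list num_of_pages pages_per_file (get_split_list num_of_pages pages_per_file)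

-- ===== LEMMAS AND PROOFS =====

-- canonical chunk list: n full chunks starting at m, then the trailing [m + n*p, num]
def pvChunks (n : Nat) (m p num : Int) : List (List Int) :=
  match n with
  | 0 => [[m, num]]
  | n+1 => [m, m + p] :: pvChunks n (m + p) p num

-- the Int boundary list m, m+p, …, m+n*p, num
def pvBnds (n : Nat) (m p num : Int) : List Int :=
  match n with
  | 0 => [m, num]
  | n+1 => m :: pvBnds n (m + p) p num

theorem pvLoopA (p num : Int) : ∀ (n : Nat) (a : Int) (acc : List (List Int)) (m : Int),
    ((PySem.List.pyRange a (a + n) 1).foldl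
      (fun (s : List (List Int) × Int) (_ : Int) => (s.1 ++ [[s.2, p + s.2]], s.2 + p)) (acc, m)) =
    (acc ++ (pvChunks n m p num).dropLast, m + n * p) := by
  intro n
  induction n with
  | zero => intro a acc m; simp [PySem.List.pyRange_one_eq_nil, pvChunks]
  | succ k ih =>
    intro a acc m
    rw [PySem.List.pyRange_one_cons (by push_cast; omega)]
    simp only [List.foldl_cons]
    rw [show (a + ((k + 1 : Nat) : Int)) = (a + 1) + ((k : Nat) : Int) by push_cast; ring]
    rw [ih (a + 1) (acc ++ [[m, p + m]]) (m + p)]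
    have hne : pvChunks k (m + p) p num ≠ [] := by cases k <;> simp [pvChunks]
    rw [show pvChunks (k + 1) m p num = [m, m + p] :: pvChunks k (m + p) p num from rfl,
        List.dropLast_cons_of_ne_nil hne]
    simp only [Prod.mk.injEq]
    refine ⟨?_, by push_cast; ring⟩
    rw [add_comm p m]
    simp

theorem pvBndsMap (p num : Int) : ∀ (n : Nat) (m : Int),
    (List.range (n + 1)).map (fun i : Nat => m + (i : Int) * p) ++ [num] = pvBnds n m p num := by
  intro n
  induction n with
  | zero => intro m; simp [pvBnds]
  | succ k ih =>
    intro m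
    rw [List.range_succ_eq_map]
    simp only [List.map_cons, List.map_map]
    have h : ((fun i : Nat => m + (i : Int) * p) ∘ Nat.succ) = (fun i : Nat => (m + p) + (i : Int) * p) := by
      funext i; simp [Function.comp]; ring
    rw [h]
    simp only [List.cons_append]
    rw [ih (m + p)]
    rw [show pvBnds (k + 1) m p num = m :: pvBnds k (m + p) p num from rfl]
    simp

theorem pvZipAdj (p num : Int) : ∀ (n : Nat) (m : Int),
    ((pvBnds n m p num).zip (pvBnds n m p num).tail).map (fun ab => [ab.1, ab.2]) =
    pvChunks n m p num := by
  intro n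
  induction n with
  | zero => intro m; simp [pvBnds, pvChunks]
  | succ k ih =>
    intro m
    obtain ⟨t, ht⟩ : ∃ t, pvBnds k (m + p) p num = (m + p) :: t := by
      cases k <;> exact ⟨_, rfl⟩
    have ht2 : ((m + p) :: t).zip t = (pvBnds k (m + p) p num).zip (pvBnds k (m + p) p num).tail := by
      rw [ht]; rfl
    rw [show pvBnds (k + 1) m p num = m :: pvBnds k (m + p) p num from rfl, List.tail_cons, ht]
    simp only [List.zip_cons_cons, List.map_cons]
    rw [show pvChunks (k + 1) m p num = [m, m + p] :: pvChunks k (m + p) p num from rfl]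
    congr 1
    rw [ht2, ih (m + p)]

theorem pvChunks_dropLast (p num : Int) : ∀ (n : Nat) (m : Int),
    (pvChunks n m p num).dropLast ++ [[m + n * p, num]] = pvChunks n m p num := by
  intro n
  induction n with
  | zero => intro m; simp [pvChunks]
  | succ k ih =>
    intro m
    rw [show pvChunks (k + 1) m p num = [m, m + p] :: pvChunks k (m + p) p num from rfl]
    have hne : pvChunks k (m + p) p num ≠ [] := by cases k <;> simp [pvChunks]
    rw [List.dropLast_cons_of_ne_nil hne, List.cons_append]
    rw [show m + ((k + 1 : Nat) : Int) * p = (m + p) + ((k : Nat) : Int) * p by push_cast; ring]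
    rw [ih (m + p)]

theorem pvA_eq_chunks (num p : Int) :
    get_split_list num p = pvChunks (PySem.Int.floordiv num p).toNat 0 p num := by
  simp only [get_split_list]
  set q := PySem.Int.floordiv num p with hq
  have hsplit : PySem.List.pyRange 0 q 1 = PySem.List.pyRange 0 (0 + (q.toNat : Int)) 1 := by
    by_cases h : q ≤ 0
    · rw [PySem.List.pyRange_one_eq_nil (by omega), PySem.List.pyRange_one_eq_nil (by omega)]
    · congr 1; omega
  rw [hsplit, pvLoopA p num q.toNat 0 [] 0]
  simp only [List.nil_append]
  exact pvChunks_dropLast p num q.toNat 0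

theorem pvB_eq_chunks (num p : Int) :
    get_split_list_alt num p = pvChunks (PySem.Int.floordiv num p).toNat 0 p num := by
  simp only [get_split_list_alt]
  set n := (PySem.Int.floordiv num p).toNat with hn
  have hmax : max (PySem.Int.floordiv num p) 0 + 1 = ((n + 1 : Nat) : Int) := by
    push_cast; omega
  rw [hmax, PySem.List.pyRange_zero_natCast, List.map_map]
  have h1 : ((fun i : Int => i * p) ∘ fun k : Nat => (k : Int)) = (fun i : Nat => 0 + (i : Int) * p) := by
    funext i; simp
  rw [h1, pvBndsMap p num n 0, PySem.List.slice_from_one]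
  exact pvZipAdj p num n 0

-- ===== VERDICT (by name: the statement is the Claim_ definition above) =====
theorem get_split_list_spec : Claim_equal_get_split_list := by
  intro num p _ _
  unfold Spec_get_split_list
  rw [pvA_eq_chunks, pvB_eq_chunks]
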